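-- pv_equiv track=rewrite | github.com/Wilsonchoo2017/bws | services/brickeconomy/parser.py | _synthesize_candlestick_from_value_chart
-- ===== SOURCE A (Python) =====
-- def _synthesize_candlestick_from_value_chart(
--     value_chart: tuple[tuple[str, int], ...],
-- ) -> tuple[tuple[str, int, int, int, int], ...]:
--     """Synthesize monthly OHLC candles from daily/weekly value chart data.
--
--     Groups value_chart points by month and computes open/high/low/close
--     for each month. This provides candlestick-equivalent data when the
--     old drawSalesChartMonth() function is not present on the page.
--
--     Each output tuple is (iso_month, low, open, close, high) in cents,
--     matching the format from _parse_candlestick.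
--     """
--     if not value_chart:
--         return ()
--
--     # Group by year-month
--     monthly: dict[str, list[int]] = {}
--     for date_str, price_cents in value_chart:
--         month_key = date_str[:7]  # "YYYY-MM"
--         monthly.setdefault(month_key, []).append(price_cents)
--
--     if not monthly:
--         return ()
--
--     candles: list[tuple[str, int, int, int, int]] = []
--     for month_key in sorted(monthly):
--         prices = monthly[month_key]
--         open_price = prices[0]
--         close_price = prices[-1]
--         high_price = max(prices)
--         low_price = min(prices)
--         # Match old format: (month, low, open, close, high)
--         candles.append((month_key, low_price, open_price, close_price, high_price))
--
--     return tuple(candles)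
-- ===== SOURCE B (Python) =====
-- def _synthesize_candlestick_from_value_chart(
--     value_chart: tuple[tuple[str, int], ...],
-- ) -> tuple[tuple[str, int, int, int, int], ...]:
--     """Single pass: per month keep a running (low, open, close, high) tuple;
--     no per-month price lists and no max()/min() scans over them."""
--     acc: dict[str, tuple[int, int, int, int]] = {}
--     for date_str, price in value_chart:
--         k = date_str[:7]
--         cur = acc.get(k)
--         if cur is None:
--             acc[k] = (price, price, price, price)
--         else:
--             lo, op, _cl, hi = cur
--             acc[k] = (min(lo, price), op, price, max(hi, price))
--     return tuple((k,) + acc[k] for k in sorted(acc))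
-- ===== Notes on version B (the rewrite author's own statement) =====
-- stated objective: alternative
-- what changed: Replaces the per-month price-list accumulation followed by prices[0]/prices[-1]/max()/min() scans with a single pass that keeps one running (low, open, close, high) tuple per month, so no intermediate lists are built and no per-group scan remains.
import Mathlib
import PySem

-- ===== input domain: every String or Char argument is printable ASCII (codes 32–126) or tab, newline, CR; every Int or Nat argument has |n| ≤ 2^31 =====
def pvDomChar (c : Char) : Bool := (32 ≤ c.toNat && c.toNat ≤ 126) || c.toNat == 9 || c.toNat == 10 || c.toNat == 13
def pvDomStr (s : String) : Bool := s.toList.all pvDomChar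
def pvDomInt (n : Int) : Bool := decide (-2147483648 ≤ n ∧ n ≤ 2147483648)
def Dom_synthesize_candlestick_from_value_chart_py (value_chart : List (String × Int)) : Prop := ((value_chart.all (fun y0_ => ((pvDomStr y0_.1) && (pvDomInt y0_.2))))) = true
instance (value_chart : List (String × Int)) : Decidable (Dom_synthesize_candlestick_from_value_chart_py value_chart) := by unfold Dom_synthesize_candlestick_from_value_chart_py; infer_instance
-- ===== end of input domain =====

-- B replaces A's per-month price lists (scanned with prices[0]/prices[-1]/max/min) by one
-- running (low, open, close, high) tuple per month updated in a single pass (objective: alternative).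

-- ===== PORT A =====
def synthesize_candlestick_from_value_chart_py (value_chart : List (String × Int)) : List (String × Int × Int × Int × Int) :=
  if value_chart = [] then []
  else
    -- monthly.setdefault(k, []).append(p)  ==  monthly[k] = monthly.get(k, []) + [p]
    let monthly : PySem.Dict String (List Int) :=
      value_chart.foldl
        (fun d p => d.modify (PySem.Str.slice p.1 none (some 7)) [] (fun l => l ++ [p.2]))
        PySem.Dict.empty
    if monthly.items = [] then []
    else
      (PySem.List.sorted monthly.keys (fun k => k) false).foldl
        (fun candles month_key =>
          let prices := monthly.getD month_key []   -- monthly[month_key]; key always present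
          let open_price := (PySem.List.pyGet? prices 0).getD 0      -- prices[0]; never none here
          let close_price := (PySem.List.pyGet? prices (-1)).getD 0  -- prices[-1]; never none here
          let high_price := (PySem.List.max? prices (fun x => x)).getD 0  -- max(prices); never none here
          let low_price := (PySem.List.min? prices (fun x => x)).getD 0   -- min(prices); never none here
          candles ++ [(month_key, low_price, open_price, close_price, high_price)])
        []

-- ===== PORT B =====
-- one running-candle update: new month → all four fields are the price; else low=min, close=price, high=max
def pvBUpd (cur : Option (Int × Int × Int × Int)) (price : Int) : Int × Int × Int × Int :=
  match cur with
  | none => (price, price, price, price)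
  | some (lo, op, _cl, hi) => (min lo price, op, price, max hi price)

def synthesize_candlestick_from_value_chart_py_alt (value_chart : List (String × Int)) : List (String × Int × Int × Int × Int) :=
  let acc : PySem.Dict String (Int × Int × Int × Int) :=
    value_chart.foldl
      (fun d p => d.insert (PySem.Str.slice p.1 none (some 7))
                    (pvBUpd (d.get? (PySem.Str.slice p.1 none (some 7))) p.2))
      PySem.Dict.empty
  (PySem.List.sorted acc.keys (fun k => k) false).map
    (fun k =>
      let v := acc.getD k (0, 0, 0, 0)  -- acc[k]; key always present
      (k, v.1, v.2.1, v.2.2.1, v.2.2.2))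

-- ===== PRECONDITION & SPEC =====
def Spec_synthesize_candlestick_from_value_chart_py (value_chart : List (String × Int)) (out : List (String × Int × Int × Int × Int)) : Prop := out = synthesize_candlestick_from_value_chart_py_alt value_chart
instance (value_chart : List (String × Int)) (out : List (String × Int × Int × Int × Int)) : Decidable (Spec_synthesize_candlestick_from_value_chart_py value_chart out) := by unfold Spec_synthesize_candlestick_from_value_chart_py; infer_instance

-- ===== CLAIM (what is proved, stated in full; the proofs are below) =====
def Claim_equal_synthesize_candlestick_from_value_chart_py : Prop := ∀ (value_chart : List (String × Int)), Dom_synthesize_candlestick_from_value_chart_py value_chart → Spec_synthesize_candlestick_from_value_chart_py value_chart (synthesize_candlestick_from_value_chart_py value_chart)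

-- ===== LEMMAS AND PROOFS =====

-- B's running candle, as a function of the month's price list (in order)
def pvSummary (l : List Int) : Option (Int × Int × Int × Int) :=
  l.foldl (fun acc p => some (pvBUpd acc p)) none

theorem pvSummary_append (l : List Int) (p : Int) :
    pvSummary (l ++ [p]) = some (pvBUpd (pvSummary l) p) := by
  simp [pvSummary, List.foldl_append]

theorem pvSummary_run (t : List Int) : ∀ (lo op cl hi : Int),
    t.foldl (fun acc p => some (pvBUpd acc p)) (some (lo, op, cl, hi))
      = some (t.foldl min lo, op, t.getLast?.getD cl, t.foldl max hi) := by
  induction t with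
  | nil => intro lo op cl hi; rfl
  | cons x t ih =>
      intro lo op cl hi
      have h1 : pvBUpd (some (lo, op, cl, hi)) x = (min lo x, op, x, max hi x) := rfl
      simp only [List.foldl_cons, h1, ih, List.getLast?_cons, Option.getD_some]

theorem pvSummary_cons (a : Int) (t : List Int) :
    pvSummary (a :: t) = some (t.foldl min a, a, t.getLast?.getD a, t.foldl max a) := by
  have h0 : pvBUpd none a = (a, a, a, a) := rfl
  simp only [pvSummary, List.foldl_cons, h0, pvSummary_run]

-- the per-point dict steps of the two ports
def pvStepA (d : PySem.Dict String (List Int)) (p : String × Int) : PySem.Dict String (List Int) :=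
  d.modify (PySem.Str.slice p.1 none (some 7)) [] (fun l => l ++ [p.2])

def pvStepB (d : PySem.Dict String (Int × Int × Int × Int)) (p : String × Int) : PySem.Dict String (Int × Int × Int × Int) :=
  d.insert (PySem.Str.slice p.1 none (some 7)) (pvBUpd (d.get? (PySem.Str.slice p.1 none (some 7))) p.2)

-- invariant: B's dict is pointwise the summary of A's dict
theorem pv_inv (vc : List (String × Int)) :
    ∀ (dA : PySem.Dict String (List Int)) (dB : PySem.Dict String (Int × Int × Int × Int)),
    (∀ c, dB.get? c = pvSummary (dA.getD c [])) →
    ∀ c, (vc.foldl pvStepB dB).get? c = pvSummary ((vc.foldl pvStepA dA).getD c []) := by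
  induction vc with
  | nil => intro dA dB h c; exact h c
  | cons p vc ih =>
      intro dA dB h c
      simp only [List.foldl_cons]
      apply ih
      intro c'
      simp only [pvStepA, pvStepB, PySem.Dict.get?_insert, PySem.Dict.getD_modify, h]
      split_ifs with hc
      · rw [pvSummary_append]
      · rfl

theorem pv_keys_eq (vc : List (String × Int)) :
    (vc.foldl pvStepB PySem.Dict.empty).keys = (vc.foldl pvStepA PySem.Dict.empty).keys := by
  show (vc.foldl (fun d p => d.insert (PySem.Str.slice p.1 none (some 7))
          ((fun (d : PySem.Dict String (Int × Int × Int × Int)) (p : String × Int) =>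
            pvBUpd (d.get? (PySem.Str.slice p.1 none (some 7))) p.2) d p)) PySem.Dict.empty).keys
      = _
  rw [PySem.Dict.keys_foldl_insert_key]
  show _ = (vc.foldl (fun d p => d.modify (PySem.Str.slice p.1 none (some 7)) []
          ((fun (_ : PySem.Dict String (List Int)) (p : String × Int) (l : List Int) =>
            l ++ [p.2]) d p)) PySem.Dict.empty).keys
  rw [PySem.Dict.keys_foldl_modify_key]
  rfl

-- ===== VERDICT (by name: the statement is the Claim_ definition above) =====
theorem synthesize_candlestick_from_value_chart_py_spec : Claim_equal_synthesize_candlestick_from_value_chart_py := by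
  intro vc _
  unfold Spec_synthesize_candlestick_from_value_chart_py
  unfold synthesize_candlestick_from_value_chart_py synthesize_candlestick_from_value_chart_py_alt
  by_cases hvc : vc = []
  · subst hvc; rfl
  · simp only [hvc, if_false]
    have hkeys := pv_keys_eq vc
    have hinv := pv_inv vc PySem.Dict.empty PySem.Dict.empty
      (by intro c; simp [pvSummary, PySem.Dict.get?_empty, PySem.Dict.getD_empty]) -- empty dicts agree
    set dA := vc.foldl pvStepA PySem.Dict.empty with hdA
    set dB := vc.foldl pvStepB PySem.Dict.empty with hdB
    have hsA : (vc.foldl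
        (fun d p => d.modify (PySem.Str.slice p.1 none (some 7)) [] (fun l => l ++ [p.2]))
        PySem.Dict.empty) = dA := rfl
    have hsB : (vc.foldl
        (fun d p => d.insert (PySem.Str.slice p.1 none (some 7))
          (pvBUpd (d.get? (PySem.Str.slice p.1 none (some 7))) p.2))
        PySem.Dict.empty) = dB := rfl
    rw [hsA, hsB, hkeys]
    by_cases hit : dA.items = []
    · have : dA.keys = [] := by simp [PySem.Dict.keys, hit]
      simp [hit, this, PySem.List.sorted_eq_nil_iff]
    · simp only [hit, if_false, PySem.List.foldl_append_singleton_eq_map, List.nil_append]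
      apply List.map_congr_left
      intro k hk
      have hkmem : k ∈ dA.keys := ((PySem.List.mem_sorted _ _ _ _).mp hk)
      have hkB : k ∈ dB.keys := by rw [hkeys]; exact hkmem
      have hgB : dB.get? k ≠ none := by
        intro hnone
        exact ((PySem.Dict.get?_eq_none_iff_not_mem_keys _ _).mp hnone) hkB
      have hsum := hinv k
      -- A's list at k is nonempty
      rcases hl : dA.getD k [] with _ | ⟨a, t⟩
      · rw [hl] at hsum; exact absurd hsum (by simpa [pvSummary] using hgB)
      · rw [hl] at hsum
        rw [pvSummary_cons] at hsum
        rw [PySem.Dict.getD_eq_get?_getD, hsum]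
        simp only [Option.getD_some]
        rw [PySem.List.min?_id_cons, PySem.List.max?_id_cons, PySem.List.pyGet?_neg_one]
        simp [PySem.List.pyGet?, PySem.List.pyIdx?, List.getLast?_cons]
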